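-- pv_equiv track=rewrite | github.com/biocom-uib/biotrees | src/Combinatorics.py | subsets_with_k_elements_that_contain_subset_s
-- ===== SOURCE A (Python) =====
-- def subsets_with_k_elements(S, k):
--     """
--     Gives a list with all the sublists of S with k elements.
--     :param S: `list` instance.
--     :param k: `int` instance.
--     :return: `list` instance.
--     """
--     if k == 0:
--         return
--     elif k == 1:
--         for x in S:
--             yield [x]
--     else:
--         for i in range(0, len(S)):
--             s = S[i + 1:]
--             for x in subsets_with_k_elements(s, k - 1):
--                 yield [S[i]] + x
--
-- def set_minus(L,l):
--     """
--     Takes two lists and substracts all the elements of the second list to the first one.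
--     :param L: `list` instance.
--     :param l: `list` instance.
--     :return: `list` instance.
--     """
--     return [x for x in L if x not in l]
--
-- def subset(l, L):
--     """
--     Takes two lists and returns True if the first one is contained in the second one. If the lists could be sorted,
--     it would be more efficient.
--     :param l: `list` instance.
--     :param L: `list` instance.
--     :return: `bool` instance.
--     """
--     return all(x in L for x in l)
--
-- def subsets_with_k_elements_that_contain_subset_s(S, k, s):
--     """
--     Returns a list with all the sublists of S of length k that contain a given sublist s.
--     :param S: `list` instance.
--     :param k: `int` instance.
--     :param s: `list` instance.
--     :return: `list` instance.
--     """
--     if k < len(s):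
--         return
--     elif not subset(s, S):
--         return
--     elif k == len(s):
--         yield s
--     else:
--         for x in subsets_with_k_elements(set_minus(S, s), k - len(s)):
--             yield s + x
-- ===== SOURCE B (Python) =====
-- def subsets_with_k_elements_that_contain_subset_s(S, k, s):
--     """
--     Same enumeration as the recursive version, but with an explicit work stack
--     instead of recursion: each frame (pre, rem, t) stands for "extend prefix
--     pre with t elements chosen from rem"; children are pushed in reverse so
--     the leftmost choice is expanded first (same lexicographic order).
--     """
--     if k < len(s) or not all(x in S for x in s):
--         return
--     m = k - len(s)
--     if m == 0:
--         yield s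
--         return
--     R = [x for x in S if x not in s]
--     stack = [(s, R, m)]
--     while stack:
--         pre, rem, t = stack.pop()
--         if t == 1:
--             for x in rem:
--                 yield pre + [x]
--         else:
--             for i in range(len(rem) - 1, -1, -1):
--                 stack.append((pre + [rem[i]], rem[i + 1:], t - 1))
-- ===== Notes on version B (the rewrite author's own statement) =====
-- stated objective: alternative
-- what changed: A enumerates the k-subsets by a recursive generator (choose the index of the first element, recurse on the suffix); B keeps the same guards but drives the enumeration with an explicit while-loop over a work stack of (prefix, remaining, count) frames, pushing child frames in reverse so the output order is identical.
import Mathlib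
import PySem

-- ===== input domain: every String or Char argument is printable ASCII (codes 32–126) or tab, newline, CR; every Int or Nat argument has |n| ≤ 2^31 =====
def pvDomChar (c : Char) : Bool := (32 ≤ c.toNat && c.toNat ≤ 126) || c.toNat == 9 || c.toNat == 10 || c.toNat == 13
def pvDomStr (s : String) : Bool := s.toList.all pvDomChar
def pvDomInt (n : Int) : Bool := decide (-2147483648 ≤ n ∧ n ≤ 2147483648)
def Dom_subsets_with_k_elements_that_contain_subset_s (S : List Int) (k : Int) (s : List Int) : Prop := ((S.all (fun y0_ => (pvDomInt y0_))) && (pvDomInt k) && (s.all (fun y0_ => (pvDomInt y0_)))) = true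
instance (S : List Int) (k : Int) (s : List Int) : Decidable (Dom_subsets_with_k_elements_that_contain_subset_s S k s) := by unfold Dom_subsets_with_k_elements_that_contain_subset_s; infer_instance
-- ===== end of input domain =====

-- B replaces A's recursive generator by an explicit work-stack loop over (prefix, remaining, count) frames; same output in the same order; objective: alternative decomposition, no speed claim.

-- ===== PORT A =====
-- subsets_with_k_elements(S, k): recursive generator; loop over the index i of the first chosen element, recurse on S[i+1:]
-- (the .attach is termination plumbing only: it carries i ∈ range into decreasing_by)
def pySwk (S : List Int) (k : Int) : List (List Int) :=
  if k = 0 then []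
  else if k = 1 then S.map (fun x => [x])
  else (List.range S.length).attach.flatMap (fun ⟨i, hi⟩ =>
    (pySwk (PySem.List.slice S (some ((i + 1 : Nat) : Int)) none) (k - 1)).map
      (fun x => S[i]! :: x))
termination_by S.length
decreasing_by
  simp only [List.mem_range] at hi
  rw [PySem.List.slice_from_natCast]
  simp only [List.length_drop]
  omega

def subsets_with_k_elements_that_contain_subset_s (S : List Int) (k : Int) (s : List Int) : List (List Int) :=
  if k < (s.length : Int) then []
  else if ¬ (s.all (fun x => S.contains x)) then []
  else if k = (s.length : Int) then [s]
  else (pySwk (S.filter (fun x => !s.contains x)) (k - (s.length : Int))).map (fun x => s ++ x)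

-- ===== PORT B =====
-- measure used only for the termination of the stack loop
def pvMeasure (st : List (List Int × List Int × Int)) : Nat :=
  (st.map (fun f => 4 ^ f.2.1.length)).sum

-- geometric bound: the child frames pushed for one popped frame weigh strictly less than it
theorem pvGeom (L : Nat) :
    3 * (((List.range L).map (fun i => 4 ^ (L - (i + 1)))).sum) + 1 = 4 ^ L := by
  induction L with
  | zero => rfl
  | succ L ih =>
    rw [List.range_succ_eq_map]
    simp only [List.map_cons, List.map_map, List.sum_cons]
    have h1 : ((List.range L).map ((fun i => 4 ^ (L + 1 - (i + 1))) ∘ (fun i => i + 1))).sum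
        = ((List.range L).map (fun i => 4 ^ (L - (i + 1)))).sum := by
      congr 1
      apply List.map_congr_left
      intro i _
      simp only [Function.comp]
      congr 1
      omega
    have h2 : L + 1 - (0 + 1) = L := by omega
    rw [h1, h2]
    have h4 : 4 ^ (L + 1) = 4 * 4 ^ L := by ring
    omega

-- while stack: pop (pre, rem, t); t == 1 yields pre+[x] for x in rem; else push children for i = len(rem)-1 .. 0
-- (pushing back-to-front onto a Python stack = prepending the children front-to-back here)
def pvStackRun : List (List Int × List Int × Int) → List (List Int)
  | [] => []
  | (pre, rem, t) :: rest =>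
    if t = 1 then (rem.map (fun x => pre ++ [x])) ++ pvStackRun rest
    else pvStackRun
      (((List.range rem.length).map (fun i =>
          (pre ++ [rem[i]!], PySem.List.slice rem (some ((i + 1 : Nat) : Int)) none, t - 1))) ++ rest)
termination_by st => pvMeasure st
decreasing_by
  · simp only [pvMeasure, List.map_cons, List.sum_cons]
    have : 1 ≤ 4 ^ rem.length := Nat.one_le_pow _ _ (by omega)
    omega
  · simp only [pvMeasure, List.map_append, List.sum_append, List.map_map, List.map_cons,
      List.sum_cons]
    have he : ((List.range rem.length).map
          ((fun f : List Int × List Int × Int => 4 ^ f.2.1.length) ∘ (fun i =>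
            (pre ++ [rem[i]!], PySem.List.slice rem (some ((i + 1 : Nat) : Int)) none, t - 1)))).sum
        = ((List.range rem.length).map (fun i => 4 ^ (rem.length - (i + 1)))).sum := by
      congr 1
      apply List.map_congr_left
      intro i _
      simp only [Function.comp]
      rw [PySem.List.slice_from_natCast]
      simp [List.length_drop]
    rw [he]
    have := pvGeom rem.length
    omega

def subsets_with_k_elements_that_contain_subset_s_alt (S : List Int) (k : Int) (s : List Int) : List (List Int) :=
  if k < (s.length : Int) ∨ ¬ (s.all (fun x => S.contains x)) then []
  else if k - (s.length : Int) = 0 then [s]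
  else pvStackRun [(s, S.filter (fun x => !s.contains x), k - (s.length : Int))]

-- ===== PRECONDITION & SPEC =====
def Spec_subsets_with_k_elements_that_contain_subset_s (S : List Int) (k : Int) (s : List Int) (out : List (List Int)) : Prop := out = subsets_with_k_elements_that_contain_subset_s_alt S k s
instance (S : List Int) (k : Int) (s : List Int) (out : List (List Int)) : Decidable (Spec_subsets_with_k_elements_that_contain_subset_s S k s out) := by unfold Spec_subsets_with_k_elements_that_contain_subset_s; infer_instance

-- ===== CLAIM (what is proved, stated in full; the proofs are below) =====
def Claim_equal_subsets_with_k_elements_that_contain_subset_s : Prop := ∀ (S : List Int) (k : Int) (s : List Int), Dom_subsets_with_k_elements_that_contain_subset_s S k s → Spec_subsets_with_k_elements_that_contain_subset_s S k s (subsets_with_k_elements_that_contain_subset_s S k s)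

-- ===== LEMMAS AND PROOFS =====

-- A's inner generator yields nothing once the requested size is ≤ 0 (reached only on the k = 0 guard in Python; stated for all k ≤ 0 because B's stack frames can carry such counts through the uniform invariant below)
theorem pySwk_nonpos (n : Nat) : ∀ (S : List Int), S.length = n → ∀ k : Int, k ≤ 0 → pySwk S k = [] := by
  induction n using Nat.strong_induction_on with
  | _ n ih =>
    intro S hS k hk
    rw [pySwk.eq_def]
    by_cases h0 : k = 0
    · simp [h0]
    · have h1 : k ≠ 1 := by omega
      simp only [h0, h1, if_false]
      rw [List.flatMap_eq_nil_iff]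
      rintro ⟨i, hi⟩ _
      simp only [List.mem_range] at hi
      have hlen : (PySem.List.slice S (some ((i + 1 : Nat) : Int)) none).length
          = S.length - (i + 1) := by
        rw [PySem.List.slice_from_natCast]; simp
      rw [ih (S.length - (i + 1)) (by omega) _ hlen (k - 1) (by omega)]
      simp

-- loop invariant: the stack loop emits, frame by frame, exactly what A's recursive generator emits for each frame
theorem pvStackRun_eq : ∀ st,
    pvStackRun st = st.flatMap (fun f => (pySwk f.2.1 f.2.2).map (fun x => f.1 ++ x)) := by
  intro st
  induction st using pvStackRun.induct with
  | case1 => simp [pvStackRun]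
  | case2 pre rem rest ih =>
    rw [pvStackRun.eq_def]
    simp only [List.flatMap_cons, ih]
    rw [pySwk.eq_def]
    norm_num
  | case3 pre rem t rest ht ih =>
    rw [pvStackRun.eq_def]
    simp only [ht, if_false, ih, List.flatMap_append, List.flatMap_cons]
    congr 1
    by_cases h0 : t = 0
    · subst h0
      conv_rhs => rw [pySwk.eq_def]
      norm_num
      intro a _
      exact pySwk_nonpos _ _ rfl _ (by omega)
    · conv_rhs => rw [pySwk.eq_def]
      simp only [h0, ht, if_false]
      simp only [List.flatMap_subtype, List.unattach_attach]
      rw [List.map_flatMap, List.flatMap_map]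
      congr 1
      funext i
      simp only [List.map_map]
      congr 1
      funext x
      simp

theorem subsets_with_k_elements_that_contain_subset_s_spec_aux :
    ∀ (S : List Int) (k : Int) (s : List Int),
      subsets_with_k_elements_that_contain_subset_s S k s
        = subsets_with_k_elements_that_contain_subset_s_alt S k s := by
  intro S k s
  unfold subsets_with_k_elements_that_contain_subset_s subsets_with_k_elements_that_contain_subset_s_alt
  by_cases h1 : k < (s.length : Int)
  · rw [if_pos h1, if_pos (Or.inl h1)]
  · by_cases h2 : (s.all (fun x => S.contains x)) = true
    · by_cases h3 : k = (s.length : Int)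
      · have h0 : k - (s.length : Int) = 0 := by omega
        rw [if_neg h1, if_neg (not_not_intro h2), if_pos h3,
          if_neg (not_or.mpr ⟨h1, not_not_intro h2⟩), if_pos h0]
      · have hne : ¬ (k - (s.length : Int) = 0) := by omega
        rw [if_neg h1, if_neg (not_not_intro h2), if_neg h3,
          if_neg (not_or.mpr ⟨h1, not_not_intro h2⟩), if_neg hne]
        rw [pvStackRun_eq]
        simp
    · rw [if_neg h1, if_pos h2, if_pos (Or.inr h2)]

-- ===== VERDICT (by name: the statement is the Claim_ definition above) =====
theorem subsets_with_k_elements_that_contain_subset_s_spec : Claim_equal_subsets_with_k_elements_that_contain_subset_s := by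
  intro S k s _
  unfold Spec_subsets_with_k_elements_that_contain_subset_s
  exact subsets_with_k_elements_that_contain_subset_s_spec_aux S k s
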